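-- pv_equiv track=rewrite | github.com/acordonez/ENSO_metrics | plots/driver_plot_metric_comparison.py | add_suffix
-- ===== SOURCE A (Python) =====
-- from copy import deepcopy
--
-- def add_suffix(list_met):
--     list_metrics1 = deepcopy(list_met)
--     list_metrics2 = deepcopy(list_met)
--     for met in list_metrics2:
--         if "Map" in met:
--             while met in list_metrics1:
--                 list_metrics1.remove(met)
--             for suffix in ["Corr", "Rmse"]:
--                 list_metrics1.append(met + suffix)
--     return sorted(list_metrics1, key=lambda v: v.upper())
-- ===== SOURCE B (Python) =====
-- def add_suffix(list_met):
--     keep = [m for m in list_met if "Map" not in m]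
--     pairs = [m + s for m in list_met if "Map" in m for s in ("Corr", "Rmse")]
--     return sorted(keep + pairs, key=lambda v: v.upper())
-- ===== Notes on version B (the rewrite author's own statement) =====
-- stated objective: simpler
-- what changed: Replaces A's deepcopies and nested while/remove rescans with one filter pass for non-'Map' metrics plus one flat pass emitting a Corr/Rmse pair per 'Map' occurrence, then the same sort.
-- intended difference: On lists where some element equals an earlier 'Map'-element plus 'Corr' or 'Rmse', A's remove loop deletes the suffixed name it appended for the earlier element and silently drops that metric, while B keeps one Corr/Rmse pair per 'Map' occurrence, which is the intended expansion. — e.g. on add_suffix(["aMap", "aMapCorr"]): A returns ["aMapCorrCorr", "aMapCorrRmse", "aMapRmse"], B returns ["aMapCorr", "aMapCorrCorr", "aMapCorrRmse", "aMapRmse"]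
import Mathlib
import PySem

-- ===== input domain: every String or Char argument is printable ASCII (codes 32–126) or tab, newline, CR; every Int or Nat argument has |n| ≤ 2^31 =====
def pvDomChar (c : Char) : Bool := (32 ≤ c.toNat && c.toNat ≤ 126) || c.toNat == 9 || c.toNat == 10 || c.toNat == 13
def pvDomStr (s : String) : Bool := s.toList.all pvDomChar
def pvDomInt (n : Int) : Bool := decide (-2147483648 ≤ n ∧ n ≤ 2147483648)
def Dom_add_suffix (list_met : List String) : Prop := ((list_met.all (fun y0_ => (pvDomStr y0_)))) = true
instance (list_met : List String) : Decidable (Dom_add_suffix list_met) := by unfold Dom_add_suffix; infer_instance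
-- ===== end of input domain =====

-- B replaces A's deepcopy + while/remove rescans with one filter for the unchanged metrics and one
-- flat pass emitting the Corr/Rmse pair per 'Map' occurrence (objective: simpler).
-- ===== PORT A =====

-- '"Map" in met'
def pvHasMap (met : String) : Bool := PySem.Str.isIn "Map" met

-- 'while met in list1: list1.remove(met)': Python list.remove drops the first occurrence,
-- which on a member is List.erase (PySem.List.remove?_eq_some_erase); the fuel only bounds the
-- loop (each remove shortens the list), it does not change the computation.
def pvWhileRemoveGo (met : String) : Nat → List String → List String
  | 0, l => l
  | n + 1, l => if met ∈ l then pvWhileRemoveGo met n (l.erase met) else l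

def pvWhileRemove (met : String) (l : List String) : List String :=
  pvWhileRemoveGo met l.length l

-- Python's sort key 'v.upper()' compares strings code-point lexicographically,
-- which is '<' on the char list (PYSEM: str comparison = '<' on s.toList).
def pvKey (v : String) : List Char := (PySem.Str.upper v).toList

def add_suffix (list_met : List String) : List String :=
  let list_metrics1 := list_met  -- deepcopy
  let list_metrics2 := list_met  -- deepcopy
  let final := list_metrics2.foldl (fun list1 met =>
    if pvHasMap met then
      ["Corr", "Rmse"].foldl (fun l suffix => l ++ [met ++ suffix]) (pvWhileRemove met list1)
    else list1) list_metrics1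
  PySem.List.sorted final pvKey false

-- ===== PORT B =====
def add_suffix_alt (list_met : List String) : List String :=
  let keep := list_met.filter (fun m => !(pvHasMap m))
  let pairs := list_met.flatMap (fun m => if pvHasMap m then [m ++ "Corr", m ++ "Rmse"] else [])
  PySem.List.sorted (keep ++ pairs) pvKey false

-- ===== PRECONDITION & SPEC =====
-- On lists where some element equals an EARLIER 'Map'-element + 'Corr'/'Rmse', A's remove loop
-- deletes the suffixed name it has just appended for the earlier element, silently dropping a
-- metric; B keeps one Corr/Rmse pair per 'Map' occurrence, which is the intended expansion.
def pvPairFree : List String → Bool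
  | [] => true
  | a :: t => (!(pvHasMap a) || t.all (fun m => !(m == a ++ "Corr") && !(m == a ++ "Rmse"))) && pvPairFree t

def D_add_suffix (list_met : List String) : Prop := pvPairFree list_met = false
instance (list_met : List String) : Decidable (D_add_suffix list_met) := by unfold D_add_suffix; infer_instance

def Spec_add_suffix (list_met : List String) (out : List String) : Prop := ¬ D_add_suffix list_met → out = add_suffix_alt list_met
instance (list_met : List String) (out : List String) : Decidable (Spec_add_suffix list_met out) := by unfold Spec_add_suffix; infer_instance

def pvDiffWitness_add_suffix : List String := ["aMap", "aMapCorr"]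
def pvDiffWitnessOut_add_suffix : (List String) × (List String) :=
  (["aMapCorrCorr", "aMapCorrRmse", "aMapRmse"],
   ["aMapCorr", "aMapCorrCorr", "aMapCorrRmse", "aMapRmse"])

-- ===== CLAIM (what is proved, stated in full; the proofs are below) =====
def Claim_unchanged_add_suffix : Prop := ∀ (list_met : List String), Dom_add_suffix list_met → Spec_add_suffix list_met (add_suffix list_met)
def Claim_changed_add_suffix : Prop := Dom_add_suffix (pvDiffWitness_add_suffix) ∧ D_add_suffix (pvDiffWitness_add_suffix) ∧ add_suffix (pvDiffWitness_add_suffix) = pvDiffWitnessOut_add_suffix.1 ∧ add_suffix_alt (pvDiffWitness_add_suffix) = pvDiffWitnessOut_add_suffix.2 ∧ pvDiffWitnessOut_add_suffix.1 ≠ pvDiffWitnessOut_add_suffix.2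
def Claim_exact_add_suffix : Prop := ∀ (list_met : List String), Dom_add_suffix list_met → D_add_suffix list_met → add_suffix list_met ≠ add_suffix_alt list_met

-- ===== LEMMAS AND PROOFS =====

lemma filter_ne_erase (met : String) (l : List String) :
    (l.erase met).filter (fun x => x != met) = l.filter (fun x => x != met) := by
  induction l with
  | nil => rfl
  | cons a t ih =>
    by_cases h : a = met
    · subst h; simp
    · simp [h, ih]

lemma filter_ne_of_not_mem (met : String) (l : List String) (h : met ∉ l) :
    l.filter (fun x => x != met) = l := by
  rw [List.filter_eq_self]
  intro a ha
  simp only [bne_iff_ne, ne_eq]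
  exact fun e => h (e ▸ ha)

lemma pvWhileRemoveGo_eq (met : String) : ∀ (n : Nat) (l : List String), l.length ≤ n →
    pvWhileRemoveGo met n l = l.filter (fun x => x != met) := by
  intro n
  induction n with
  | zero =>
    intro l hl
    have : l = [] := List.eq_nil_of_length_eq_zero (Nat.le_zero.mp hl)
    subst this; rfl
  | succ n ih =>
    intro l hl
    rw [pvWhileRemoveGo]
    by_cases h : met ∈ l
    · rw [if_pos h, ih _ (by rw [List.length_erase_of_mem h]; omega), filter_ne_erase]
    · rw [if_neg h, filter_ne_of_not_mem met l h]

lemma pvWhileRemove_eq (met : String) (l : List String) :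
    pvWhileRemove met l = l.filter (fun x => x != met) := pvWhileRemoveGo_eq met l.length l le_rfl

def pvPairs (l : List String) : List String :=
  l.flatMap (fun m => if pvHasMap m then [m ++ "Corr", m ++ "Rmse"] else [])

-- the accumulated pair list after processing r, starting from pending pairs P
-- (each 'Map' met first deletes its copies among the pending pairs, then appends its own pair)
def pvPairsAfter : List String → List String → List String
  | P, [] => P
  | P, met :: r' =>
    pvPairsAfter (if pvHasMap met then P.filter (fun x => x != met) ++ [met ++ "Corr", met ++ "Rmse"] else P) r'

lemma loop_general (r : List String) : ∀ (k P : List String),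
    r.foldl (fun list1 met =>
        if pvHasMap met then
          ["Corr", "Rmse"].foldl (fun l suffix => l ++ [met ++ suffix]) (pvWhileRemove met list1)
        else list1) (k ++ P)
      = k.filter (fun m => !(pvHasMap m && decide (m ∈ r))) ++ pvPairsAfter P r := by
  induction r with
  | nil => intro k P; simp [pvPairsAfter]
  | cons met r' ih =>
    intro k P
    rw [List.foldl_cons]
    by_cases hm : pvHasMap met = true
    · have hinit : (if pvHasMap met = true then
            ["Corr", "Rmse"].foldl (fun l suffix => l ++ [met ++ suffix]) (pvWhileRemove met (k ++ P))
          else k ++ P)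
          = k.filter (fun x => x != met) ++ (P.filter (fun x => x != met) ++ [met ++ "Corr", met ++ "Rmse"]) := by
        rw [if_pos hm, pvWhileRemove_eq, List.filter_append]
        simp
      rw [hinit, ih (k.filter (fun x => x != met)) (P.filter (fun x => x != met) ++ [met ++ "Corr", met ++ "Rmse"])]
      rw [List.filter_filter]
      have hcongr : ∀ x : String,
          ((!(pvHasMap x && decide (x ∈ r'))) && (x != met))
            = !(pvHasMap x && decide (x ∈ met :: r')) := by
        intro x
        by_cases hx : x = met
        · subst hx; simp [hm]
        · simp [List.mem_cons, hx]
      simp only [hcongr]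
      simp [pvPairsAfter, hm]
    · have hmF : pvHasMap met = false := by simpa using hm
      rw [if_neg hm, ih k P]
      have hcongr : ∀ x : String,
          (!(pvHasMap x && decide (x ∈ r'))) = !(pvHasMap x && decide (x ∈ met :: r')) := by
        intro x
        by_cases hx : x = met
        · subst hx; simp [hmF]
        · simp [List.mem_cons, hx]
      simp only [hcongr]
      simp [pvPairsAfter, hmF]

lemma pairsAfter_nocoll : ∀ (r P : List String),
    (∀ m ∈ r, pvHasMap m = true → m ∉ P) → pvPairFree r = true →
    pvPairsAfter P r = P ++ pvPairs r := by
  intro r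
  induction r with
  | nil => intro P _ _; simp [pvPairsAfter, pvPairs]
  | cons met r' ih =>
    intro P hP hfree
    simp only [pvPairFree, Bool.and_eq_true, Bool.or_eq_true, Bool.not_eq_true',
      List.all_eq_true, Bool.and_eq_true, Bool.not_eq_true'] at hfree
    obtain ⟨hhead, hfree'⟩ := hfree
    rw [pvPairsAfter]
    by_cases hm : pvHasMap met = true
    · have hPmet : met ∉ P := hP met (List.mem_cons_self ..) hm
      rw [if_pos hm, filter_ne_of_not_mem met P hPmet]
      rw [ih (P ++ [met ++ "Corr", met ++ "Rmse"])
        (by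
          intro m hmr' hmMap
          have hnotP : m ∉ P := hP m (List.mem_cons_of_mem _ hmr') hmMap
          have hne := (hhead.resolve_left (by simp [hm])) m hmr'
          simp only [List.mem_append, List.mem_cons, List.not_mem_nil]
          rintro (h | h | h | h)
          · exact hnotP h
          · exact absurd (beq_iff_eq.mpr h) (by simp [hne.1])
          · exact absurd (beq_iff_eq.mpr h) (by simp [hne.2])
          · exact h)
        hfree']
      simp [pvPairs, hm]
    · have hmF : pvHasMap met = false := by simpa using hm
      rw [if_neg hm, ih P (fun m hmr' => hP m (List.mem_cons_of_mem _ hmr')) hfree']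
      simp [pvPairs, hmF]

lemma final_list_eq (l : List String) (h : pvPairFree l = true) :
    l.foldl (fun list1 met =>
        if pvHasMap met then
          ["Corr", "Rmse"].foldl (fun le suffix => le ++ [met ++ suffix]) (pvWhileRemove met list1)
        else list1) l
      = l.filter (fun m => !(pvHasMap m)) ++ pvPairs l := by
  have h0 := loop_general l l []
  rw [List.append_nil] at h0
  rw [h0, pairsAfter_nocoll l [] (by simp) h, List.nil_append]
  congr 1
  apply List.filter_congr
  intro x hx
  simp [hx]

-- ===== tightness: inside D_ the two results always differ =====

lemma hasMap_append (a s : String) (h : pvHasMap a = true) : pvHasMap (a ++ s) = true := by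
  rw [pvHasMap, PySem.Str.isIn_iff_infix] at h ⊢
  obtain ⟨u, v, huv⟩ := h
  exact ⟨u, v ++ s.toList, by rw [String.toList_append, ← huv]; simp⟩

-- a collision event during the processing of r starting with pending pairs P:
-- some 'Map' met of r is among the pending pairs at its own step (and so gets deleted)
def pvColl : List String → List String → Prop
  | _, [] => False
  | P, met :: r' => (pvHasMap met = true ∧ met ∈ P) ∨
      pvColl (if pvHasMap met then P.filter (fun x => x != met) ++ [met ++ "Corr", met ++ "Rmse"] else P) r'

lemma coll_of_mem : ∀ (r P : List String) (y : String), pvHasMap y = true → y ∈ P → y ∈ r → pvColl P r := by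
  intro r
  induction r with
  | nil => intro P y _ _ h; exact absurd h (List.not_mem_nil)
  | cons met r' ih =>
    intro P y hy hyP hyr
    by_cases hmet : y = met
    · subst hmet; exact Or.inl ⟨hy, hyP⟩
    · rcases List.mem_cons.mp hyr with h | h
      · exact absurd h hmet
      · refine Or.inr (ih _ y hy ?_ h)
        by_cases hm : pvHasMap met = true
        · rw [if_pos hm]
          exact List.mem_append_left _ (List.mem_filter.mpr ⟨hyP, by simp [hmet]⟩)
        · rw [if_neg hm]; exact hyP

lemma coll_of_not_pairFree : ∀ (r P : List String), pvPairFree r = false → pvColl P r := by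
  intro r
  induction r with
  | nil => intro P h; exact absurd h (by simp [pvPairFree])
  | cons met r' ih =>
    intro P h
    by_cases hfree' : pvPairFree r' = true
    · -- the head clause must be the failing one
      rw [pvPairFree, hfree', Bool.and_true, Bool.or_eq_false_iff] at h
      obtain ⟨hm', hall⟩ := h
      have hm : pvHasMap met = true := by simpa using hm'
      rw [List.all_eq_false] at hall
      obtain ⟨y, hyr', hy⟩ := hall
      have hy' : y = met ++ "Corr" ∨ y = met ++ "Rmse" := by
        revert hy
        cases h1 : (y == met ++ "Corr") <;> cases h2 : (y == met ++ "Rmse") <;> simp_all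
      have hyMap : pvHasMap y = true := by
        rcases hy' with rfl | rfl <;> exact hasMap_append met _ hm
      refine Or.inr (coll_of_mem r' _ y hyMap ?_ hyr')
      rw [if_pos hm]
      rcases hy' with rfl | rfl <;> simp
    · have : pvPairFree r' = false := by simpa using hfree'
      exact Or.inr (ih _ this)

lemma length_pvPairs_cons_map (met : String) (r' : List String) (hm : pvHasMap met = true) :
    (pvPairs (met :: r')).length = 2 + (pvPairs r').length := by simp [pvPairs, hm]; omega

lemma length_pvPairs_cons_nomap (met : String) (r' : List String) (hmF : pvHasMap met = false) :
    (pvPairs (met :: r')).length = (pvPairs r').length := by simp [pvPairs, hmF]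

lemma length_pairsAfter_le : ∀ (r P : List String),
    (pvPairsAfter P r).length ≤ P.length + (pvPairs r).length := by
  intro r
  induction r with
  | nil => intro P; simp [pvPairsAfter, pvPairs]
  | cons met r' ih =>
    intro P
    rw [pvPairsAfter]
    by_cases hm : pvHasMap met = true
    · rw [if_pos hm]
      calc (pvPairsAfter (P.filter (fun x => x != met) ++ [met ++ "Corr", met ++ "Rmse"]) r').length
          ≤ (P.filter (fun x => x != met) ++ [met ++ "Corr", met ++ "Rmse"]).length + (pvPairs r').length := ih _
        _ ≤ P.length + (pvPairs (met :: r')).length := by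
            rw [length_pvPairs_cons_map met r' hm]
            have := List.length_filter_le (fun x => x != met) P
            simp only [List.length_append, List.length_cons, List.length_nil]
            omega
    · rw [if_neg hm]
      have hmF : pvHasMap met = false := by simpa using hm
      calc (pvPairsAfter P r').length ≤ P.length + (pvPairs r').length := ih _
        _ = P.length + (pvPairs (met :: r')).length := by rw [length_pvPairs_cons_nomap met r' hmF]

lemma length_pairsAfter_lt : ∀ (r P : List String), pvColl P r →
    (pvPairsAfter P r).length < P.length + (pvPairs r).length := by
  intro r
  induction r with
  | nil => intro P h; exact absurd h (by simp [pvColl])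
  | cons met r' ih =>
    intro P hcoll
    rw [pvPairsAfter]
    rcases hcoll with ⟨hm, hmem⟩ | hcoll'
    · rw [if_pos hm]
      have hstrict : (P.filter (fun x => x != met)).length < P.length := by
        refine List.length_filter_lt_length_iff_exists.mpr ⟨met, hmem, by simp⟩
      calc (pvPairsAfter (P.filter (fun x => x != met) ++ [met ++ "Corr", met ++ "Rmse"]) r').length
          ≤ (P.filter (fun x => x != met) ++ [met ++ "Corr", met ++ "Rmse"]).length + (pvPairs r').length :=
            length_pairsAfter_le _ _
        _ < P.length + (pvPairs (met :: r')).length := by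
            rw [length_pvPairs_cons_map met r' hm]
            simp only [List.length_append, List.length_cons, List.length_nil]
            omega
    · by_cases hm : pvHasMap met = true
      · rw [if_pos hm] at hcoll' ⊢
        calc (pvPairsAfter (P.filter (fun x => x != met) ++ [met ++ "Corr", met ++ "Rmse"]) r').length
            < (P.filter (fun x => x != met) ++ [met ++ "Corr", met ++ "Rmse"]).length + (pvPairs r').length :=
              ih _ hcoll'
          _ ≤ P.length + (pvPairs (met :: r')).length := by
              rw [length_pvPairs_cons_map met r' hm]
              have := List.length_filter_le (fun x => x != met) P
              simp only [List.length_append, List.length_cons, List.length_nil]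
              omega
      · rw [if_neg hm] at hcoll' ⊢
        have hmF : pvHasMap met = false := by simpa using hm
        calc (pvPairsAfter P r').length < P.length + (pvPairs r').length := ih _ hcoll'
          _ = P.length + (pvPairs (met :: r')).length := by rw [length_pvPairs_cons_nomap met r' hmF]

-- ===== VERDICT (by name: the statement is the Claim_ definition above) =====
theorem add_suffix_spec : Claim_unchanged_add_suffix := by
  intro l _ hD
  have hfree : pvPairFree l = true := by
    unfold D_add_suffix at hD
    cases h : pvPairFree l
    · exact absurd h hD
    · rfl
  show add_suffix l = add_suffix_alt l
  simp only [add_suffix, add_suffix_alt]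
  rw [final_list_eq l hfree]
  rfl

theorem add_suffix_changed : Claim_changed_add_suffix := by unfold Claim_changed_add_suffix; decide

theorem add_suffix_tight : Claim_exact_add_suffix := by
  intro l _ hD heq
  unfold D_add_suffix at hD
  have h0 := loop_general l l []
  rw [List.append_nil] at h0
  have hA : add_suffix l
      = PySem.List.sorted (l.filter (fun m => !(pvHasMap m && decide (m ∈ l))) ++ pvPairsAfter [] l) pvKey false := by
    simp only [add_suffix]
    rw [h0]
  have hB : add_suffix_alt l
      = PySem.List.sorted (l.filter (fun m => !(pvHasMap m)) ++ pvPairs l) pvKey false := rfl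
  have hlenA : (add_suffix l).length
      = (l.filter (fun m => !(pvHasMap m && decide (m ∈ l)))).length + (pvPairsAfter [] l).length := by
    rw [hA, PySem.List.length_sorted, List.length_append]
  have hlenB : (add_suffix_alt l).length
      = (l.filter (fun m => !(pvHasMap m))).length + (pvPairs l).length := by
    rw [hB, PySem.List.length_sorted, List.length_append]
  have hfeq : l.filter (fun m => !(pvHasMap m && decide (m ∈ l))) = l.filter (fun m => !(pvHasMap m)) := by
    apply List.filter_congr
    intro x hx
    simp [hx]
  have hlt : (pvPairsAfter [] l).length < (pvPairs l).length := by
    have := length_pairsAfter_lt l [] (coll_of_not_pairFree l [] hD)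
    simpa using this
  rw [heq, hlenB] at hlenA
  rw [hfeq] at hlenA
  omega
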